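-- pv_equiv track=rewrite | github.com/dado-beo/Esercizio-n.2---Vendite-per-reparto | es1.py | partita_con_meno_gol
-- ===== SOURCE A (Python) =====
-- def partita_con_meno_gol(tupla_partite):
--     cont = 0
--     for (squadra1, squadra2, punteggio1, punteggio2) in tupla_partite:
--         # Inizializzo il valore minimo
--         if (cont == 0):
--             minTot = punteggio1 + punteggio2
--             cont += 1
--
--         # Individuo il min
--         if(punteggio1 + punteggio2 < minTot):
--             minTot = punteggio1 + punteggio2
--
--     # Individuo la partita
--     for (squadra1, squadra2, punteggio1, punteggio2) in tupla_partite: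
--         if(punteggio1 + punteggio2 == minTot):
--             return (squadra1, squadra2, punteggio1, punteggio2)
-- ===== SOURCE B (Python) =====
-- def partita_con_meno_gol(tupla_partite):
--     best = None
--     best_tot = None
--     for match in tupla_partite:
--         tot = match[2] + match[3]
--         if best is None or tot < best_tot:
--             best = match
--             best_tot = tot
--     return best
-- ===== Notes on version B (the rewrite author's own statement) =====
-- stated objective: simpler
-- what changed: Replaces A's two passes (first compute the minimum total, then rescan for the first match with that total) by a single pass that keeps the first match with strictly minimal total.
-- outside the precondition, e.g. on partita_con_meno_gol([]): A returns None, B returns None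
import Mathlib
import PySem

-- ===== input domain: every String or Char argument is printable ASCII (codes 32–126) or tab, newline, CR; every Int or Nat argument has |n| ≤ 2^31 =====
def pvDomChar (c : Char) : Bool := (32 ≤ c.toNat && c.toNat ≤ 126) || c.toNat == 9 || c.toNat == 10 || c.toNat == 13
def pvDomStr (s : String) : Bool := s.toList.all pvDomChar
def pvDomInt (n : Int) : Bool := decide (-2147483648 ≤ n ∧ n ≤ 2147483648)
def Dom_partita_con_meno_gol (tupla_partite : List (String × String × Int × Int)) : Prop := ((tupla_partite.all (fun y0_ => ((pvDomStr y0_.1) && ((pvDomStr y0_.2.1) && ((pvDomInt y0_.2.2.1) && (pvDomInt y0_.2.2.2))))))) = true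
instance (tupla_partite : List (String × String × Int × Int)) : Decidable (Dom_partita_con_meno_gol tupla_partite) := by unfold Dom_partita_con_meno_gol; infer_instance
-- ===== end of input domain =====

-- B is a single pass keeping the first match with strictly minimal goal total,
-- instead of A's two passes (compute the minimum, then rescan for its first occurrence). Objective: simpler.

-- ===== PORT A =====
-- total goals of a match (punteggio1 + punteggio2)
def pvSum (x : String × String × Int × Int) : Int := x.2.2.1 + x.2.2.2

-- first loop body: state (cont, minTot)
def pA_step (s : Int × Int) (x : String × String × Int × Int) : Int × Int :=
  let minTot := if s.1 == 0 then pvSum x else s.2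
  let cont := if s.1 == 0 then s.1 + 1 else s.1
  let minTot := if pvSum x < minTot then pvSum x else minTot
  (cont, minTot)

-- second loop: return the first match whose total equals minTot
-- (Python falls off the end and returns None when no match has that total or the list is
-- empty; that happens only outside Pre_, where this port returns a placeholder tuple)
def pA_find (minTot : Int) : List (String × String × Int × Int) → String × String × Int × Int
  | [] => ("", "", 0, 0)
  | x :: r => if pvSum x == minTot then x else pA_find minTot r

def partita_con_meno_gol (tupla_partite : List (String × String × Int × Int)) : String × String × Int × Int :=
  let s := tupla_partite.foldl pA_step (0, 0)
  pA_find s.2 tupla_partite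

-- ===== PORT B =====
-- single-pass body: state is the best match so far with its total (None before the first match)
def pB_step (st : Option ((String × String × Int × Int) × Int))
    (x : String × String × Int × Int) : Option ((String × String × Int × Int) × Int) :=
  let tot := x.2.2.1 + x.2.2.2
  match st with
  | none => some (x, tot)
  | some (b, bt) => if tot < bt then some (x, tot) else some (b, bt)

def partita_con_meno_gol_alt (tupla_partite : List (String × String × Int × Int)) : String × String × Int × Int :=
  match tupla_partite.foldl pB_step none with
  | some (b, _) => b
  | none => ("", "", 0, 0)   -- Python B returns None here; only outside Pre_

-- ===== PRECONDITION & SPEC =====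
-- Pre_ excludes the empty list, on which both Pythons fall off the loop and return None, not a tuple.
def Pre_partita_con_meno_gol (tupla_partite : List (String × String × Int × Int)) : Prop := tupla_partite ≠ []
instance (tupla_partite : List (String × String × Int × Int)) : Decidable (Pre_partita_con_meno_gol tupla_partite) := by unfold Pre_partita_con_meno_gol; infer_instance
def pvWitness_partita_con_meno_gol : (List (String × String × Int × Int)) := [("a", "b", 1, 2), ("c", "d", 0, 1)]

def Spec_partita_con_meno_gol (tupla_partite : List (String × String × Int × Int)) (out : String × String × Int × Int) : Prop := out = partita_con_meno_gol_alt tupla_partite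
instance (tupla_partite : List (String × String × Int × Int)) (out : String × String × Int × Int) : Decidable (Spec_partita_con_meno_gol tupla_partite out) := by unfold Spec_partita_con_meno_gol; infer_instance

-- ===== CLAIM (what is proved, stated in full; the proofs are below) =====
def Claim_equal_partita_con_meno_gol : Prop := ∀ (tupla_partite : List (String × String × Int × Int)), Dom_partita_con_meno_gol tupla_partite → Pre_partita_con_meno_gol tupla_partite → Spec_partita_con_meno_gol tupla_partite (partita_con_meno_gol tupla_partite)

-- ===== LEMMAS AND PROOFS =====

-- the running minimum computed by A's first loop once cont is 1
def pvMinfold (m : Int) (xs : List (String × String × Int × Int)) : Int :=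
  xs.foldl (fun m x => if pvSum x < m then pvSum x else m) m

theorem pA_loop1_cont1 (xs : List (String × String × Int × Int)) (m : Int) :
    xs.foldl pA_step (1, m) = (1, pvMinfold m xs) := by
  induction xs generalizing m with
  | nil => rfl
  | cons x xs ih =>
      simp [List.foldl, pA_step, pvMinfold, List.foldl] at *
      split_ifs <;> simp [ih]

theorem pvMinfold_le (m : Int) (xs : List (String × String × Int × Int)) :
    pvMinfold m xs ≤ m := by
  induction xs generalizing m with
  | nil => simp [pvMinfold]
  | cons x xs ih =>
      simp only [pvMinfold, List.foldl]
      split_ifs with h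
      · exact le_of_lt (lt_of_le_of_lt (ih _) h)
      · exact ih m

theorem pB_key (xs : List (String × String × Int × Int)) (b : String × String × Int × Int) :
    xs.foldl pB_step (some (b, pvSum b))
      = some (pA_find (pvMinfold (pvSum b) xs) (b :: xs), pvMinfold (pvSum b) xs) := by
  induction xs generalizing b with
  | nil => simp [pvMinfold, pA_find]
  | cons x xs ih =>
      have hstep : pB_step (some (b, pvSum b)) x
          = if pvSum x < pvSum b then some (x, pvSum x) else some (b, pvSum b) := by
        simp [pB_step, pvSum]
      by_cases h : pvSum x < pvSum b
      · have hm : pvMinfold (pvSum b) (x :: xs) = pvMinfold (pvSum x) xs := by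
          simp [pvMinfold, List.foldl, h]
        rw [List.foldl_cons, hstep, if_pos h, ih, hm]
        have hle : pvMinfold (pvSum x) xs ≤ pvSum x := pvMinfold_le _ _
        have hne : ¬ (pvSum b == pvMinfold (pvSum x) xs) = true := by
          simp only [beq_iff_eq]; omega
        simp [pA_find, hne]
      · have hm : pvMinfold (pvSum b) (x :: xs) = pvMinfold (pvSum b) xs := by
          simp [pvMinfold, List.foldl, h]
        rw [List.foldl_cons, hstep, if_neg h, ih, hm]
        by_cases hb : pvSum b = pvMinfold (pvSum b) xs
        · rw [show pA_find (pvMinfold (pvSum b) xs) (b :: xs) = b from by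
            rw [pA_find, if_pos (beq_iff_eq.mpr hb)],
           show pA_find (pvMinfold (pvSum b) xs) (b :: x :: xs) = b from by
            rw [pA_find, if_pos (beq_iff_eq.mpr hb)]]
        · have hle : pvMinfold (pvSum b) xs ≤ pvSum b := pvMinfold_le _ _
          have hbf : ¬ (pvSum b == pvMinfold (pvSum b) xs) = true := by
            simp only [beq_iff_eq]; omega
          have hx : ¬ (pvSum x == pvMinfold (pvSum b) xs) = true := by
            simp only [beq_iff_eq]; omega
          rw [show pA_find (pvMinfold (pvSum b) xs) (b :: x :: xs)
                = pA_find (pvMinfold (pvSum b) xs) xs from by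
              rw [pA_find, if_neg hbf, pA_find, if_neg hx],
             show pA_find (pvMinfold (pvSum b) xs) (b :: xs)
                = pA_find (pvMinfold (pvSum b) xs) xs from by
              rw [pA_find, if_neg hbf]]

-- ===== VERDICT (by name: the statement is the Claim_ definition above) =====
theorem partita_con_meno_gol_spec : Claim_equal_partita_con_meno_gol := by
  intro l _ hpre
  unfold Spec_partita_con_meno_gol
  cases l with
  | nil => exact absurd rfl hpre
  | cons x xs =>
      have hA0 : pA_step (0, 0) x = (1, pvSum x) := by
        simp [pA_step]
      have hB0 : pB_step none x = some (x, pvSum x) := rfl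
      unfold partita_con_meno_gol partita_con_meno_gol_alt
      rw [List.foldl_cons, List.foldl_cons, hA0, hB0, pA_loop1_cont1, pB_key]
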